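-- pv_equiv track=rewrite | github.com/MendozaLab/erdos-experiments | Erdos30/exp_gc02_tracy_widom.py | gf3_mul
-- ===== SOURCE A (Python) =====
-- def gf3_mul(u, v, q, red):
--     """
--     Multiply u, v in GF(q^3).
--     Elements: [c0, c1, c2] = c0 + c1*x + c2*x^2.
--     Reduction rule: x^3 = red[0] + red[1]*x + red[2]*x^2.
--     """
--     w = [0] * 5
--     for i in range(3):
--         for j in range(3):
--             w[i + j] = (w[i + j] + u[i] * v[j]) % q
--     r0, r1, r2 = red
--     # x^4 = x * x^3 = r0*x + r1*x^2 + r2*(r0+r1*x+r2*x^2)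
--     x4 = [(r2 * r0) % q, (r0 + r2 * r1) % q, (r1 + r2 * r2) % q]
--     for i in range(3):
--         w[i] = (w[i] + w[4] * x4[i] + w[3] * red[i]) % q
--     return [w[0], w[1], w[2]]
-- ===== SOURCE B (Python) =====
-- def gf3_mul(u, v, q, red):
--     """
--     Multiply u, v in GF(q^3), reducing high degrees with a generic
--     high-to-low reduction loop instead of a precomputed x^4 vector.
--     """
--     w = [0] * 5
--     for i in range(3):
--         for j in range(3):
--             w[i + j] = (w[i + j] + u[i] * v[j]) % q
--     for deg in (4, 3):
--         c = w[deg]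
--         w[deg] = 0
--         for k in range(3):
--             w[deg - 3 + k] = (w[deg - 3 + k] + c * red[k]) % q
--     return w[:3]
-- ===== Notes on version B (the rewrite author's own statement) =====
-- stated objective: simpler
-- what changed: The hand-expanded x^4 reduction vector and its one-shot folding line are replaced by a generic high-to-low reduction loop over degrees 4 and 3 that folds each high coefficient down with the x^3 rule directly.
import Mathlib
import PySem

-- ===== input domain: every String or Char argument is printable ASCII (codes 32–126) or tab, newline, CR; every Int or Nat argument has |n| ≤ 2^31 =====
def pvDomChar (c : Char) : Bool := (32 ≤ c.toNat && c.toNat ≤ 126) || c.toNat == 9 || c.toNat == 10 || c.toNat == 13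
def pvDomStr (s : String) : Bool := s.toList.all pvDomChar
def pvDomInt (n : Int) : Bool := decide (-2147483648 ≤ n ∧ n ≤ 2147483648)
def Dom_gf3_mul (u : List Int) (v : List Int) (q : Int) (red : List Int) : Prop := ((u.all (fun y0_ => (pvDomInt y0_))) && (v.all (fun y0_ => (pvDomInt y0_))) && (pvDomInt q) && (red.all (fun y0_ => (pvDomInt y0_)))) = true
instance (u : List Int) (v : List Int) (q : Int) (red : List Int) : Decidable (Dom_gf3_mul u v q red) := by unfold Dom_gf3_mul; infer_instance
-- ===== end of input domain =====

-- B replaces A's hand-expanded x^4 reduction vector with a generic high-to-low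
-- reduction loop over degrees 4 and 3 (objective: simpler); same return values.

-- ===== PORT A =====
def gf3_mul (u : List Int) (v : List Int) (q : Int) (red : List Int) : List Int :=
  let w : List Int := List.replicate 5 0
  let w := (PySem.List.pyRange 0 3 1).foldl (fun w i =>
    (PySem.List.pyRange 0 3 1).foldl (fun w j =>
      w.set (i + j).toNat
        (PySem.Int.mod (PySem.List.pyGetD w (i + j) 0
          + PySem.List.pyGetD u i 0 * PySem.List.pyGetD v j 0) q)) w) w
  -- r0, r1, r2 = red   (Pre_ requires red to have exactly three elements)
  let r0 := PySem.List.pyGetD red 0 0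
  let r1 := PySem.List.pyGetD red 1 0
  let r2 := PySem.List.pyGetD red 2 0
  let x4 : List Int := [PySem.Int.mod (r2 * r0) q,
                        PySem.Int.mod (r0 + r2 * r1) q,
                        PySem.Int.mod (r1 + r2 * r2) q]
  let w := (PySem.List.pyRange 0 3 1).foldl (fun w i =>
    w.set i.toNat
      (PySem.Int.mod (PySem.List.pyGetD w i 0
        + PySem.List.pyGetD w 4 0 * PySem.List.pyGetD x4 i 0
        + PySem.List.pyGetD w 3 0 * PySem.List.pyGetD red i 0) q)) w
  [PySem.List.pyGetD w 0 0, PySem.List.pyGetD w 1 0, PySem.List.pyGetD w 2 0]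

-- ===== PORT B =====
def gf3_mul_alt (u : List Int) (v : List Int) (q : Int) (red : List Int) : List Int :=
  let w : List Int := List.replicate 5 0
  let w := (PySem.List.pyRange 0 3 1).foldl (fun w i =>
    (PySem.List.pyRange 0 3 1).foldl (fun w j =>
      w.set (i + j).toNat
        (PySem.Int.mod (PySem.List.pyGetD w (i + j) 0
          + PySem.List.pyGetD u i 0 * PySem.List.pyGetD v j 0) q)) w) w
  let w := ([4, 3] : List Int).foldl (fun w deg =>
    let c := PySem.List.pyGetD w deg 0
    let w := w.set deg.toNat 0
    (PySem.List.pyRange 0 3 1).foldl (fun w k =>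
      w.set (deg - 3 + k).toNat
        (PySem.Int.mod (PySem.List.pyGetD w (deg - 3 + k) 0
          + c * PySem.List.pyGetD red k 0) q)) w) w
  PySem.List.slice w none (some 3)

-- ===== PRECONDITION & SPEC =====
-- A raises on these excluded inputs (IndexError if u or v is shorter than 3,
-- ValueError unpacking red unless it has exactly 3 elements, ZeroDivisionError if q = 0).
def Pre_gf3_mul (u : List Int) (v : List Int) (q : Int) (red : List Int) : Prop :=
  3 ≤ u.length ∧ 3 ≤ v.length ∧ red.length = 3 ∧ q ≠ 0
instance (u : List Int) (v : List Int) (q : Int) (red : List Int) : Decidable (Pre_gf3_mul u v q red) := by unfold Pre_gf3_mul; infer_instance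

def pvWitness_gf3_mul : List Int × List Int × Int × List Int := ([1, 2, 3], [4, 5, 6], 7, [1, 0, 0])

def Spec_gf3_mul (u : List Int) (v : List Int) (q : Int) (red : List Int) (out : List Int) : Prop := out = gf3_mul_alt u v q red
instance (u : List Int) (v : List Int) (q : Int) (red : List Int) (out : List Int) : Decidable (Spec_gf3_mul u v q red out) := by unfold Spec_gf3_mul; infer_instance

-- ===== CLAIM (what is proved, stated in full; the proofs are below) =====
def Claim_equal_gf3_mul : Prop := ∀ (u : List Int) (v : List Int) (q : Int) (red : List Int), Dom_gf3_mul u v q red → Pre_gf3_mul u v q red → Spec_gf3_mul u v q red (gf3_mul u v q red)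

-- ===== LEMMAS AND PROOFS =====
theorem dvd_fmod_sub (q x : Int) : q ∣ x.fmod q - x :=
  ⟨-(x.fdiv q), by rw [Int.fmod_def]; ring⟩

theorem fmod_congr (a b q : Int) (h : q ∣ a - b) : a.fmod q = b.fmod q := by
  obtain ⟨c, hc⟩ := h
  have : a = b + c * q := by linarith
  rw [this, Int.add_mul_fmod_self_right]

theorem fmod_eq_of_modEq (a b q : Int) (h : a ≡ b [ZMOD q]) : a.fmod q = b.fmod q :=
  fmod_congr a b q h.symm.dvd

theorem fmod_modEq (q x : Int) : x.fmod q ≡ x [ZMOD q] :=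
  Int.modEq_iff_dvd.mpr (dvd_sub_comm.mp (dvd_fmod_sub q x))

-- ===== VERDICT (by name: the statement is the Claim_ definition above) =====
theorem gf3_mul_spec : Claim_equal_gf3_mul := by
  intro u v q red _ hpre
  obtain ⟨hu, hv, hr, hq⟩ := hpre
  rcases u with _ | ⟨u0, u⟩ <;> rcases v with _ | ⟨v0, v⟩ <;> (simp at hu hv; try omega)
  rcases u with _ | ⟨u1, u⟩ <;> rcases v with _ | ⟨v1, v⟩ <;> (simp at hu hv; try omega)
  rcases u with _ | ⟨u2, u⟩ <;> rcases v with _ | ⟨v2, v⟩ <;> (simp at hu hv; try omega)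
  obtain ⟨r0, r1, r2, rfl⟩ := List.length_eq_three.mp hr
  show Spec_gf3_mul _ _ _ _ _
  unfold Spec_gf3_mul gf3_mul gf3_mul_alt
  have hR : PySem.List.pyRange 0 3 1 = [0, 1, 2] := by decide
  rw [hR]
  simp [PySem.List.pyGetD_ofNat', PySem.Int.mod, PySem.List.slice, List.getD]
  have hX0 := fmod_modEq q (u0 * v0)
  have hX1 := fmod_modEq q (u0 * v1 + u1 * v0)
  have hX2 := fmod_modEq q (u0 * v2 + u1 * v1 + u2 * v0)
  have hY := fmod_modEq q (u2 * v2)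
  have hZ := fmod_modEq q (u1 * v2 + u2 * v1)
  have hN : (u1 * v2 + u2 * v1 + (u2 * v2).fmod q * r2).fmod q
      ≡ u1 * v2 + u2 * v1 + u2 * v2 * r2 [ZMOD q] :=
    (fmod_modEq q _).trans ((Int.ModEq.refl (u1 * v2 + u2 * v1)).add (hY.mul_right r2))
  refine ⟨fmod_eq_of_modEq _ _ _ ?_, fmod_eq_of_modEq _ _ _ ?_, fmod_eq_of_modEq _ _ _ ?_⟩
  · calc (u0 * v0).fmod q + (u2 * v2).fmod q * (r2 * r0).fmod q + (u1 * v2 + u2 * v1).fmod q * r0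
        ≡ u0 * v0 + u2 * v2 * (r2 * r0) + (u1 * v2 + u2 * v1) * r0 [ZMOD q] :=
          (hX0.add (hY.mul (fmod_modEq q (r2 * r0)))).add (hZ.mul_right r0)
      _ = u0 * v0 + (u1 * v2 + u2 * v1 + u2 * v2 * r2) * r0 := by ring
      _ ≡ u0 * v0 + (u1 * v2 + u2 * v1 + (u2 * v2).fmod q * r2).fmod q * r0 [ZMOD q] :=
          ((Int.ModEq.refl (u0 * v0)).add (hN.mul_right r0)).symm
  · calc (u0 * v1 + u1 * v0).fmod q + (u2 * v2).fmod q * (r0 + r2 * r1).fmod q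
            + (u1 * v2 + u2 * v1).fmod q * r1
        ≡ u0 * v1 + u1 * v0 + u2 * v2 * (r0 + r2 * r1) + (u1 * v2 + u2 * v1) * r1 [ZMOD q] :=
          (hX1.add (hY.mul (fmod_modEq q (r0 + r2 * r1)))).add (hZ.mul_right r1)
      _ = u0 * v1 + u1 * v0 + u2 * v2 * r0 + (u1 * v2 + u2 * v1 + u2 * v2 * r2) * r1 := by ring
      _ ≡ u0 * v1 + u1 * v0 + (u2 * v2).fmod q * r0
            + (u1 * v2 + u2 * v1 + (u2 * v2).fmod q * r2).fmod q * r1 [ZMOD q] :=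
          (((Int.ModEq.refl (u0 * v1 + u1 * v0)).add (hY.mul_right r0)).add (hN.mul_right r1)).symm
  · calc (u0 * v2 + u1 * v1 + u2 * v0).fmod q + (u2 * v2).fmod q * (r1 + r2 * r2).fmod q
            + (u1 * v2 + u2 * v1).fmod q * r2
        ≡ u0 * v2 + u1 * v1 + u2 * v0 + u2 * v2 * (r1 + r2 * r2)
            + (u1 * v2 + u2 * v1) * r2 [ZMOD q] :=
          (hX2.add (hY.mul (fmod_modEq q (r1 + r2 * r2)))).add (hZ.mul_right r2)
      _ = u0 * v2 + u1 * v1 + u2 * v0 + u2 * v2 * r1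
            + (u1 * v2 + u2 * v1 + u2 * v2 * r2) * r2 := by ring
      _ ≡ u0 * v2 + u1 * v1 + u2 * v0 + (u2 * v2).fmod q * r1
            + (u1 * v2 + u2 * v1 + (u2 * v2).fmod q * r2).fmod q * r2 [ZMOD q] :=
          (((Int.ModEq.refl (u0 * v2 + u1 * v1 + u2 * v0)).add (hY.mul_right r1)).add
            (hN.mul_right r2)).symm
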